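-- pv_equiv track=rewrite | github.com/Sonnet-Songbird/starsector-kr-temp-patcher | scripts/06_patch_obf.py | _is_blocked_class
-- ===== SOURCE A (Python) =====
-- def _is_blocked_class(classname: str, blocked_classes: set) -> bool:
--     """클래스 경로가 blocked_classes에 포함되는지 확인 (접미 '/'는 패키지 전체 매치)."""
--     for bc in blocked_classes:
--         if bc.endswith('/'):
--             if classname.startswith(bc):
--                 return True
--         else:
--             if classname == bc:
--                 return True
--     return False
-- ===== SOURCE B (Python) =====
-- def _is_blocked_class(classname: str, blocked_classes: set) -> bool:
--     # B: probe the classname's own slash-terminated prefixes against the set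
--     # instead of scanning every blocked entry.
--     if classname in blocked_classes:
--         return True
--     prefix = []
--     for ch in classname:
--         prefix.append(ch)
--         if ch == '/' and ''.join(prefix) in blocked_classes:
--             return True
--     return False
-- ===== Notes on version B (the rewrite author's own statement) =====
-- stated objective: alternative
-- what changed: B replaces A's scan over every blocked entry by a direct set membership test of the classname plus lookups of the classname's own slash-terminated prefixes, so the blocked collection is never iterated.
import Mathlib
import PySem

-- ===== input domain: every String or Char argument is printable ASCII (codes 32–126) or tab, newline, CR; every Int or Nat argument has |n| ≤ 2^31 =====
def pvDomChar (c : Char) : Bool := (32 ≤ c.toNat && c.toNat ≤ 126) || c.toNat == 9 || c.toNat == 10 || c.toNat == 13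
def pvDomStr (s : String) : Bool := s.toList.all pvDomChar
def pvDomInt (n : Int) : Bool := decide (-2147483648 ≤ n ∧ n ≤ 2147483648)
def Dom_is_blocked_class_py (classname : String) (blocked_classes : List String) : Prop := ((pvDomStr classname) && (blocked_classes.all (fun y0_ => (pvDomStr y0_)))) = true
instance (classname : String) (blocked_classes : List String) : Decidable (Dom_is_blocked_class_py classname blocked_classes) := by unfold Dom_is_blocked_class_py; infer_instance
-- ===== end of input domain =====

-- B checks the classname itself and its slash-terminated prefixes against the blocked set,
-- replacing A's scan over every blocked entry (objective: alternative traversal, same result).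


-- ===== PORT A =====
def is_blocked_class_py (classname : String) (blocked_classes : List String) : Bool :=
  match blocked_classes with
  | [] => false
  | bc :: rest =>
    if PySem.Str.endswith bc "/" then
      if PySem.Str.startswith classname bc then true
      else is_blocked_class_py classname rest
    else
      if classname == bc then true
      else is_blocked_class_py classname rest

-- ===== PORT B =====
-- loop of B: walk classname, extending `pre`; at each '/' look the prefix up in the set
def pvAltLoop (blocked_classes : List String) (pre : List Char) (rest : List Char) : Bool :=
  match rest with
  | [] => false
  | c :: cs =>
    if c = '/' && blocked_classes.contains (String.ofList (pre ++ [c])) then true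
    else pvAltLoop blocked_classes (pre ++ [c]) cs

def is_blocked_class_py_alt (classname : String) (blocked_classes : List String) : Bool :=
  if blocked_classes.contains classname then true
  else pvAltLoop blocked_classes [] classname.toList

-- ===== PRECONDITION & SPEC =====
def Spec_is_blocked_class_py (classname : String) (blocked_classes : List String) (out : Bool) : Prop := out = is_blocked_class_py_alt classname blocked_classes
instance (classname : String) (blocked_classes : List String) (out : Bool) : Decidable (Spec_is_blocked_class_py classname blocked_classes out) := by unfold Spec_is_blocked_class_py; infer_instance

-- ===== CLAIM (what is proved, stated in full; the proofs are below) =====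
def Claim_equal_is_blocked_class_py : Prop := ∀ (classname : String) (blocked_classes : List String), Dom_is_blocked_class_py classname blocked_classes → Spec_is_blocked_class_py classname blocked_classes (is_blocked_class_py classname blocked_classes)

-- ===== LEMMAS AND PROOFS =====

theorem suffix_singleton_iff (a : Char) (l : List Char) : [a] <:+ l ↔ l.getLast? = some a := by
  constructor
  · rintro ⟨t, rfl⟩; simp
  · intro h
    rcases List.getLast?_eq_some_iff.mp h with ⟨t, rfl⟩
    exact ⟨t, rfl⟩

theorem A_iff (c : String) (bs : List String) :
    is_blocked_class_py c bs = true ↔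
      ∃ bc ∈ bs, (['/'] <:+ bc.toList ∧ bc.toList <+: c.toList) ∨ (¬ ['/'] <:+ bc.toList ∧ c = bc) := by
  induction bs with
  | nil => simp [is_blocked_class_py]
  | cons bc rest ih =>
    rw [is_blocked_class_py]
    by_cases he : PySem.Str.endswith bc "/" = true
    · have he' : ['/'] <:+ bc.toList := by
        simpa [PySem.Chars.endswith_iff] using he
      by_cases hs : PySem.Str.startswith c bc = true
      · have hs' : bc.toList <+: c.toList := by
          simpa [PySem.Chars.startswith_iff] using hs
        rw [if_pos he, if_pos hs]
        exact iff_of_true rfl ⟨bc, List.mem_cons_self, Or.inl ⟨he', hs'⟩⟩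
      · have hs' : ¬ bc.toList <+: c.toList := by
          simpa [PySem.Chars.startswith_iff] using hs
        rw [if_pos he, if_neg hs, ih]
        constructor
        · rintro ⟨x, hx, h⟩; exact ⟨x, List.mem_cons_of_mem _ hx, h⟩
        · rintro ⟨x, hx, h⟩
          rcases List.mem_cons.mp hx with rfl | hx'
          · rcases h with ⟨_, hp⟩ | ⟨hne, rfl⟩
            · exact absurd hp hs'
            · exact absurd he' hne
          · exact ⟨x, hx', h⟩
    · have he' : ¬ ['/'] <:+ bc.toList := by
        simpa [PySem.Chars.endswith_iff] using he
      by_cases hq : c = bc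
      · subst hq
        rw [if_neg he, if_pos (by simp : (c == c) = true)]
        exact iff_of_true rfl ⟨c, List.mem_cons_self, Or.inr ⟨he', rfl⟩⟩
      · rw [if_neg he, if_neg (by simpa using hq : ¬ (c == bc) = true), ih]
        constructor
        · rintro ⟨x, hx, h⟩; exact ⟨x, List.mem_cons_of_mem _ hx, h⟩
        · rintro ⟨x, hx, h⟩
          rcases List.mem_cons.mp hx with rfl | hx'
          · rcases h with ⟨hp, _⟩ | ⟨_, rfl⟩
            · exact absurd hp he'
            · exact absurd rfl hq
          · exact ⟨x, hx', h⟩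

theorem altLoop_iff (bs : List String) (pre rest : List Char) :
    pvAltLoop bs pre rest = true ↔
      ∃ p, p <+: rest ∧ ['/'] <:+ p ∧ String.ofList (pre ++ p) ∈ bs := by
  induction rest generalizing pre with
  | nil =>
    rw [pvAltLoop]
    simp only [Bool.false_eq_true, false_iff]
    rintro ⟨p, hp, hs, _⟩
    rcases List.prefix_nil.mp hp with rfl
    exact absurd hs (by simp)
  | cons ch cs ih =>
    rw [pvAltLoop]
    by_cases h1 : ch = '/' ∧ String.ofList (pre ++ [ch]) ∈ bs
    · have hcond : (decide (ch = '/') && bs.contains (String.ofList (pre ++ [ch]))) = true := by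
        rw [decide_eq_true h1.1, List.contains_iff_mem.mpr h1.2]; rfl
      rw [if_pos hcond]
      refine iff_of_true rfl ⟨[ch], ⟨cs, rfl⟩, ?_, h1.2⟩
      rw [h1.1]
    · have hcond : (decide (ch = '/') && bs.contains (String.ofList (pre ++ [ch]))) = false := by
        by_cases hc : ch = '/'
        · cases hcc : bs.contains (String.ofList (pre ++ [ch])) with
          | false => rw [Bool.and_false]
          | true => exact absurd ⟨hc, List.contains_iff_mem.mp hcc⟩ h1
        · rw [decide_eq_false hc, Bool.false_and]
      rw [if_neg (by rw [hcond]; exact Bool.false_ne_true), ih]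
      constructor
      · rintro ⟨q, hq, hs, hm⟩
        refine ⟨ch :: q, List.cons_prefix_cons.mpr ⟨rfl, hq⟩, ?_, by simpa using hm⟩
        rcases hs with ⟨t, rfl⟩
        exact ⟨ch :: t, rfl⟩
      · rintro ⟨p, hp, hs, hm⟩
        rcases p with _ | ⟨x, q⟩
        · exact absurd hs (by simp)
        · obtain ⟨hx, hq⟩ := List.cons_prefix_cons.mp hp
          subst hx
          rcases q with _ | ⟨y, q'⟩
          · have hx' : x = '/' := by simpa [suffix_singleton_iff] using hs
            exact absurd ⟨hx', hm⟩ h1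
          · refine ⟨y :: q', hq, ?_, by simpa using hm⟩
            rw [suffix_singleton_iff] at hs ⊢
            simpa using hs

theorem B_iff (c : String) (bs : List String) :
    is_blocked_class_py_alt c bs = true ↔
      c ∈ bs ∨ ∃ p, p <+: c.toList ∧ ['/'] <:+ p ∧ String.ofList p ∈ bs := by
  rw [is_blocked_class_py_alt]
  by_cases hc : c ∈ bs
  · rw [if_pos (List.contains_iff_mem.mpr hc)]
    exact iff_of_true rfl (Or.inl hc)
  · rw [if_neg (fun h => hc (List.contains_iff_mem.mp h)), altLoop_iff]
    simp only [List.nil_append]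
    constructor
    · exact fun h => Or.inr h
    · rintro (hc' | h)
      · exact absurd hc' hc
      · exact h

theorem pvAB_eq (c : String) (bs : List String) :
    is_blocked_class_py c bs = is_blocked_class_py_alt c bs := by
  rw [Bool.eq_iff_iff, A_iff, B_iff]
  constructor
  · rintro ⟨bc, hbc, ⟨hend, hpre⟩ | ⟨_, rfl⟩⟩
    · exact Or.inr ⟨bc.toList, hpre, hend, by simpa using hbc⟩
    · exact Or.inl hbc
  · rintro (hc | ⟨p, hp, hend, hmem⟩)
    · refine ⟨c, hc, ?_⟩
      by_cases h : ['/'] <:+ c.toList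
      · exact Or.inl ⟨h, List.prefix_refl _⟩
      · exact Or.inr ⟨h, rfl⟩
    · exact ⟨String.ofList p, hmem, Or.inl ⟨by simpa using hend, by simpa using hp⟩⟩

-- ===== VERDICT (by name: the statement is the Claim_ definition above) =====
theorem is_blocked_class_py_spec : Claim_equal_is_blocked_class_py := by
  intro classname blocked_classes _
  unfold Spec_is_blocked_class_py
  exact pvAB_eq classname blocked_classes
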